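-- pv_equiv track=rewrite | github.com/SeanKski/gorilla | berkeley-function-call-leaderboard/openfunctions_evaluation.py | load_file
-- ===== SOURCE A (Python) =====
-- test_categories = {
--     "executable_simple": "gorilla_openfunctions_v1_test_executable_simple.json",
--     "executable_parallel_function": "gorilla_openfunctions_v1_test_executable_parallel_function.json",
--     "executable_multiple_function": "gorilla_openfunctions_v1_test_executable_multiple_function.json",
--     "executable_parallel_multiple_function": "gorilla_openfunctions_v1_test_executable_parallel_multiple_function.json",
--     "simple": "gorilla_openfunctions_v1_test_simple.json",
--     "relevance": "gorilla_openfunctions_v1_test_relevance.json",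
--     "parallel_function": "gorilla_openfunctions_v1_test_parallel_function.json",
--     "multiple_function": "gorilla_openfunctions_v1_test_multiple_function.json",
--     "parallel_multiple_function": "gorilla_openfunctions_v1_test_parallel_multiple_function.json",
--     "java": "gorilla_openfunctions_v1_test_java.json",
--     "javascript": "gorilla_openfunctions_v1_test_javascript.json",
--     "rest": "gorilla_openfunctions_v1_test_rest.json",
--     "sql": "gorilla_openfunctions_v1_test_sql.json",
-- }
--
-- def load_file(test_category):
--     if test_category == "all":
--         test_cate, files_to_open = list(test_categories.keys()), list(
--             test_categories.values()
--         )
--     elif test_category == "no-multiple":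
--         no_multiple_cats = [cat for cat in test_categories.keys() if "multiple" not in cat]
--         test_cate,files_to_open = no_multiple_cats,[test_categories[cat] for cat in no_multiple_cats]
--     elif test_category == "simple_v0":
--         simple_cats = ["simple",
--                        "executable_simple",
--                        "java",
--                        "javascript",
--                        # "relevance", # too slow and FC gets 0 right now anyway
--                        ]
--         test_cate,files_to_open = simple_cats, [test_categories[cat] for cat in simple_cats]
--     elif test_category == "ast_only":
--         ast_cats = ["simple",
--                     "parallel_function",
--                     "multiple_function",
--                     "parallel_multiple_function",
--                     ]
--         test_cate,files_to_open = ast_cats, [test_categories[cat] for cat in ast_cats]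
--     elif test_category == "ast_relevance":
--         ast_cats = ["simple",
--                     "parallel_function",
--                     "multiple_function",
--                     "parallel_multiple_function",
--                     "relevance",
--                     ]
--         test_cate,files_to_open = ast_cats, [test_categories[cat] for cat in ast_cats]
--     else:
--         test_cate, files_to_open = [test_category], [test_categories[test_category]]
--     return test_cate, files_to_open
-- ===== SOURCE B (Python) =====
-- test_categories = {
--     "executable_simple": "gorilla_openfunctions_v1_test_executable_simple.json",
--     "executable_parallel_function": "gorilla_openfunctions_v1_test_executable_parallel_function.json",
--     "executable_multiple_function": "gorilla_openfunctions_v1_test_executable_multiple_function.json",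
--     "executable_parallel_multiple_function": "gorilla_openfunctions_v1_test_executable_parallel_multiple_function.json",
--     "simple": "gorilla_openfunctions_v1_test_simple.json",
--     "relevance": "gorilla_openfunctions_v1_test_relevance.json",
--     "parallel_function": "gorilla_openfunctions_v1_test_parallel_function.json",
--     "multiple_function": "gorilla_openfunctions_v1_test_multiple_function.json",
--     "parallel_multiple_function": "gorilla_openfunctions_v1_test_parallel_multiple_function.json",
--     "java": "gorilla_openfunctions_v1_test_java.json",
--     "javascript": "gorilla_openfunctions_v1_test_javascript.json",
--     "rest": "gorilla_openfunctions_v1_test_rest.json",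
--     "sql": "gorilla_openfunctions_v1_test_sql.json",
-- }
--
-- # composite tokens expand to lists of base categories
-- groups = {
--     "all": list(test_categories),
--     "no-multiple": [c for c in test_categories if "multiple" not in c],
--     "simple_v0": ["simple", "executable_simple", "java", "javascript"],
--     "ast_only": ["simple", "parallel_function", "multiple_function",
--                  "parallel_multiple_function"],
--     "ast_relevance": ["simple", "parallel_function", "multiple_function",
--                       "parallel_multiple_function", "relevance"],
-- }
--
-- def load_file(test_category):
--     # base case: a single known category
--     if test_category in test_categories:
--         return [test_category], [test_categories[test_category]]
--     # composite token: expand recursively, accumulating both lists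
--     cats, files = [], []
--     for sub in groups[test_category]:
--         sub_cats, sub_files = load_file(sub)
--         cats += sub_cats
--         files += sub_files
--     return cats, files
-- ===== Notes on version B (the rewrite author's own statement) =====
-- stated objective: alternative
-- what changed: Replaces the five-branch if/elif chain of parallel assignments by a recursive expansion: a known base category returns its singleton pair directly, and a composite token is resolved by recursing over its list of base categories and concatenating the sub-results into two accumulators.
import Mathlib
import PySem

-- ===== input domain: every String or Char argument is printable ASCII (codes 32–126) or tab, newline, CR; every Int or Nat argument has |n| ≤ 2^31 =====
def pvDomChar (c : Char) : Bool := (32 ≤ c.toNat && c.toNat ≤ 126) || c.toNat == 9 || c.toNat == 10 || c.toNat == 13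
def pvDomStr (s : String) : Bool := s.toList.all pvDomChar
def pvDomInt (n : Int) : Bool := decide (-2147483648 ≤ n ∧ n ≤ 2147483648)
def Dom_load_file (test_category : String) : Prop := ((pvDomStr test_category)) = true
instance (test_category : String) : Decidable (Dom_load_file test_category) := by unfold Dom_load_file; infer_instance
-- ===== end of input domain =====

-- B replaces A's if/elif chain by a recursive expansion of composite tokens into base categories (alternative decomposition).

-- ===== PORT A =====
-- the module-level dict test_categories, in insertion order
def tcDict : PySem.Dict String String := PySem.Dict.ofList [
  ("executable_simple", "gorilla_openfunctions_v1_test_executable_simple.json"),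
  ("executable_parallel_function", "gorilla_openfunctions_v1_test_executable_parallel_function.json"),
  ("executable_multiple_function", "gorilla_openfunctions_v1_test_executable_multiple_function.json"),
  ("executable_parallel_multiple_function", "gorilla_openfunctions_v1_test_executable_parallel_multiple_function.json"),
  ("simple", "gorilla_openfunctions_v1_test_simple.json"),
  ("relevance", "gorilla_openfunctions_v1_test_relevance.json"),
  ("parallel_function", "gorilla_openfunctions_v1_test_parallel_function.json"),
  ("multiple_function", "gorilla_openfunctions_v1_test_multiple_function.json"),
  ("parallel_multiple_function", "gorilla_openfunctions_v1_test_parallel_multiple_function.json"),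
  ("java", "gorilla_openfunctions_v1_test_java.json"),
  ("javascript", "gorilla_openfunctions_v1_test_javascript.json"),
  ("rest", "gorilla_openfunctions_v1_test_rest.json"),
  ("sql", "gorilla_openfunctions_v1_test_sql.json")]

-- test_categories[cat]; total via getD "" — Pre_ keeps exactly the inputs where Python does not raise KeyError
def load_file (test_category : String) : List String × List String :=
  if test_category = "all" then
    (tcDict.keys, tcDict.values)
  else if test_category = "no-multiple" then
    let no_multiple_cats := tcDict.keys.filter (fun cat => !(PySem.Str.isIn "multiple" cat))
    (no_multiple_cats, no_multiple_cats.map (fun cat => tcDict.getD cat ""))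
  else if test_category = "simple_v0" then
    let simple_cats := ["simple", "executable_simple", "java", "javascript"]
    (simple_cats, simple_cats.map (fun cat => tcDict.getD cat ""))
  else if test_category = "ast_only" then
    let ast_cats := ["simple", "parallel_function", "multiple_function", "parallel_multiple_function"]
    (ast_cats, ast_cats.map (fun cat => tcDict.getD cat ""))
  else if test_category = "ast_relevance" then
    let ast_cats := ["simple", "parallel_function", "multiple_function", "parallel_multiple_function", "relevance"]
    (ast_cats, ast_cats.map (fun cat => tcDict.getD cat ""))
  else
    ([test_category], [tcDict.getD test_category ""])

-- ===== PORT B =====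
-- module-level dict 'groups' from Source B: composite tokens → lists of base categories
def groupsDict : PySem.Dict String (List String) := PySem.Dict.ofList [
  ("all", tcDict.keys),
  ("no-multiple", tcDict.keys.filter (fun cat => !(PySem.Str.isIn "multiple" cat))),
  ("simple_v0", ["simple", "executable_simple", "java", "javascript"]),
  ("ast_only", ["simple", "parallel_function", "multiple_function", "parallel_multiple_function"]),
  ("ast_relevance", ["simple", "parallel_function", "multiple_function", "parallel_multiple_function", "relevance"])]

-- Source B's recursion, with a fuel guard for totality (fuel 2 covers the one level of expansion;
-- groups[test_category] on an unknown token raises KeyError in Python — outside Pre_ — ported as getD [])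
def loadRec (fuel : Nat) (tc : String) : List String × List String :=
  match fuel with
  | 0 => ([], [])
  | fuel + 1 =>
    if tcDict.contains tc then ([tc], [tcDict.getD tc ""])
    else
      (groupsDict.getD tc []).foldl
        (fun acc sub =>
          let r := loadRec fuel sub
          (acc.1 ++ r.1, acc.2 ++ r.2)) ([], [])

def load_file_alt (test_category : String) : List String × List String :=
  loadRec 2 test_category

-- ===== PRECONDITION & SPEC =====
-- Pre_ excludes exactly the unknown categories, on which Python A (and B) raise KeyError
def Pre_load_file (test_category : String) : Prop :=
  test_category ∈ (["all", "no-multiple", "simple_v0", "ast_only", "ast_relevance"] ++ tcDict.keys)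
instance (test_category : String) : Decidable (Pre_load_file test_category) := by unfold Pre_load_file; infer_instance
def pvWitness_load_file : String := "all"

def Spec_load_file (test_category : String) (out : List String × List String) : Prop := out = load_file_alt test_category
instance (test_category : String) (out : List String × List String) : Decidable (Spec_load_file test_category out) := by unfold Spec_load_file; infer_instance

-- ===== CLAIM (what is proved, stated in full; the proofs are below) =====
def Claim_equal_load_file : Prop := ∀ (test_category : String), Dom_load_file test_category → Pre_load_file test_category → Spec_load_file test_category (load_file test_category)

-- ===== LEMMAS AND PROOFS =====

-- ===== VERDICT (by name: the statement is the Claim_ definition above) =====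
theorem load_file_spec : Claim_equal_load_file := by
  intro tc _ pre
  unfold Pre_load_file at pre
  fin_cases pre <;> decide
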